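-- pv_equiv track=rewrite | github.com/RogerRaspini/Lista3exercicicios | exercicios_funcoed.py | gerar_saida
-- ===== SOURCE A (Python) =====
-- def gerar_saida(lista_nums: list) ->list:
--     saida = []
--     for i in range(len(lista_nums)):
--         if i % 2 == 0:
--             saida.append(lista_nums[i] * 2)
--         else:
--             saida.append(lista_nums[i] * 3)
--     return saida
-- ===== SOURCE B (Python) =====
-- def gerar_saida(lista_nums: list) -> list:
--     # Consume the list two elements at a time: each full pair contributes
--     # (even-index * 2, odd-index * 3); a trailing lone element is doubled.
--     saida = []
--     i = 0
--     n = len(lista_nums)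
--     while i + 1 < n:
--         saida.append(lista_nums[i] * 2)
--         saida.append(lista_nums[i + 1] * 3)
--         i += 2
--     if i < n:
--         saida.append(lista_nums[i] * 2)
--     return saida
-- ===== Notes on version B (the rewrite author's own statement) =====
-- stated objective: alternative
-- what changed: Replaces the per-index parity test over range(len) with a two-at-a-time pass that consumes a pair per step (double, triple) and doubles a trailing lone element.
import Mathlib
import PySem

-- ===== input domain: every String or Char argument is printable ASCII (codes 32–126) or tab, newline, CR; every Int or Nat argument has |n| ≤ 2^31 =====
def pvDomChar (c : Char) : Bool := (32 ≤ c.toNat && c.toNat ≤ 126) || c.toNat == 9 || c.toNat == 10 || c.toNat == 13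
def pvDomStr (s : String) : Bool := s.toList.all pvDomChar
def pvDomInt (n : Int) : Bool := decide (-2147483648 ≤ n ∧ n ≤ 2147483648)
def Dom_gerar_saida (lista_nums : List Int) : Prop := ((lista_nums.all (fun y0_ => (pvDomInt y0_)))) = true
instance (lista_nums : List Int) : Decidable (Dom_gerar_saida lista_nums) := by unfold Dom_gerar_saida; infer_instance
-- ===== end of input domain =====

-- B replaces A's per-index parity test with a two-at-a-time pass (alternative decomposition; same O(n) cost).

-- ===== PORT A =====
-- for i in range(len(lista_nums)): append x*2 on even i, x*3 on odd i
def gerar_saida (lista_nums : List Int) : List Int :=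
  (PySem.List.pyRange 0 (PySem.List.len lista_nums) 1).foldl
    (fun saida i =>
      if PySem.Int.mod i 2 == 0 then saida ++ [PySem.List.pyGetD lista_nums i 0 * 2]
      else saida ++ [PySem.List.pyGetD lista_nums i 0 * 3])
    []

-- ===== PORT B =====
-- while i+1 < n: take the pair (x, y), emit x*2, y*3, advance by 2; a lone trailing x emits x*2
def gerar_saida_alt (lista_nums : List Int) : List Int :=
  match lista_nums with
  | [] => []
  | [x] => [x * 2]
  | x :: y :: rest => x * 2 :: y * 3 :: gerar_saida_alt rest

-- ===== PRECONDITION & SPEC =====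
def Spec_gerar_saida (lista_nums : List Int) (out : List Int) : Prop := out = gerar_saida_alt lista_nums
instance (lista_nums : List Int) (out : List Int) : Decidable (Spec_gerar_saida lista_nums out) := by unfold Spec_gerar_saida; infer_instance

-- ===== CLAIM (what is proved, stated in full; the proofs are below) =====
def Claim_equal_gerar_saida : Prop := ∀ (lista_nums : List Int), Dom_gerar_saida lista_nums → Spec_gerar_saida lista_nums (gerar_saida lista_nums)

-- ===== LEMMAS AND PROOFS =====

-- A's fold, rewritten as a map over the natural indices of the list.
lemma gerar_saida_eq_map (xs : List Int) :
    gerar_saida xs =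
      (List.range xs.length).map
        (fun k => if k % 2 = 0 then xs.getD k 0 * 2 else xs.getD k 0 * 3) := by
  unfold gerar_saida
  rw [show (fun (saida : List Int) (i : Int) =>
        if PySem.Int.mod i 2 == 0 then saida ++ [PySem.List.pyGetD xs i 0 * 2]
        else saida ++ [PySem.List.pyGetD xs i 0 * 3])
      = (fun (saida : List Int) (i : Int) =>
        saida ++ [if PySem.Int.mod i 2 == 0 then PySem.List.pyGetD xs i 0 * 2
                  else PySem.List.pyGetD xs i 0 * 3]) from by
        funext s i
        by_cases h : (PySem.Int.mod i 2 == 0) = true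
        · rw [if_pos h, if_pos h]
        · rw [if_neg h, if_neg h]]
  rw [PySem.List.foldl_append_singleton_eq_map]
  simp only [List.nil_append, PySem.List.len, PySem.List.pyRange_one, Int.sub_zero,
    Int.toNat_natCast, List.map_map]
  apply List.map_congr_left
  intro k _
  simp only [Function.comp, Int.zero_add, PySem.List.pyGetD_natCast]
  have hmod : PySem.Int.mod (k : Int) 2 = ((k % 2 : Nat) : Int) := by
    simp only [PySem.Int.mod, Int.fmod_eq_emod,
      if_pos (Or.inl (by norm_num : (0:Int) ≤ 2))]
    omega
  by_cases h : k % 2 = 0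
  · rw [hmod, if_pos (by simp [h]), if_pos h]
  · rw [hmod, if_neg (by simp; omega), if_neg h]

-- The index-parity map over range(len) equals B's two-at-a-time recursion.
lemma map_range_eq_alt (xs : List Int) :
    (List.range xs.length).map
        (fun k => if k % 2 = 0 then xs.getD k 0 * 2 else xs.getD k 0 * 3)
      = gerar_saida_alt xs := by
  match xs with
  | [] => simp [gerar_saida_alt]
  | [x] => simp [gerar_saida_alt]
  | x :: y :: rest =>
    have ih := map_range_eq_alt rest
    simp only [gerar_saida_alt, List.length_cons]
    rw [List.range_succ_eq_map, List.range_succ_eq_map]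
    simp only [List.map_cons, List.map_map]
    rw [← ih]
    simp [Function.comp]
    intro k _
    by_cases h : k % 2 = 0
    · rw [if_pos (by omega : (k + 1 + 1) % 2 = 0), if_pos h]
    · rw [if_neg (by omega : ¬ (k + 1 + 1) % 2 = 0), if_neg h]

-- ===== VERDICT (by name: the statement is the Claim_ definition above) =====
theorem gerar_saida_spec : Claim_equal_gerar_saida := by
  intro xs _
  unfold Spec_gerar_saida
  rw [gerar_saida_eq_map, map_range_eq_alt]
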